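-- pv_equiv track=rewrite | github.com/Dragoniru/Portifolio | QuickRouteApp/views.py | calculate_fastest_route
-- ===== SOURCE A (Python) =====
-- def find_next_move(current_pos, visited, json_data):
--     next_moves = json_data.get(current_pos, {})
--     quickest_move = float('inf')
--     quickest_move_pos = None
--
--     for pos, mov_time in next_moves.items():
--         if pos not in visited and mov_time < quickest_move:
--             quickest_move = mov_time
--             quickest_move_pos = pos
--
--     return quickest_move_pos
--
-- def calculate_subroute(start, end, json_data):
--     visited = None
--     route = [start]
--     visited = set(route)
--
--     while route[-1] != end:
--         next_move = find_next_move(route[-1], visited, json_data)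
--         if next_move is None:
--             return None  # Rota não encontrada
--         route.append(next_move)
--         visited.add(next_move)
--
--     return route
--
-- def calculate_fastest_route(start, pickup, delivery, json_data):
--     route_to_pickup = calculate_subroute(start, pickup, json_data)
--     if route_to_pickup is None:
--         return None, 0
--
--     route_to_delivery = calculate_subroute(pickup, delivery, json_data)
--     if route_to_delivery is None:
--         return None, 0
--
--     full_route = route_to_pickup + route_to_delivery[1:]
--     total_time = sum(json_data[full_route[i]][full_route[i + 1]] for i in range(len(full_route) - 1))
--
--     return full_route, total_time
-- ===== SOURCE B (Python) =====
-- def calculate_fastest_route(start, pickup, delivery, json_data):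
--     # Preprocess: each node's moves sorted once by time (stable), so every greedy
--     # step is just "first not-yet-visited entry" instead of a min-scan, and the
--     # cost is accumulated while walking (no second summing pass).
--     adj = {node: sorted(moves.items(), key=lambda kv: kv[1])
--            for node, moves in json_data.items()}
--
--     def walk(src, dst):
--         route, seen, cost, cur = [src], {src}, 0, src
--         while cur != dst:
--             step = next(((p, t) for p, t in adj.get(cur, []) if p not in seen), None)
--             if step is None:
--                 return None
--             cur, t = step
--             route.append(cur)
--             seen.add(cur)
--             cost += t
--         return route, cost
--
--     leg1 = walk(start, pickup)
--     if leg1 is None: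
--         return None, 0
--     leg2 = walk(pickup, delivery)
--     if leg2 is None:
--         return None, 0
--     return leg1[0] + leg2[0][1:], leg1[1] + leg2[1]
-- ===== Notes on version B (the rewrite author's own statement) =====
-- stated objective: alternative
-- what changed: B preprocesses the graph into per-node adjacency lists stably sorted by move time once, so each greedy step becomes 'take the first not-yet-visited entry of the sorted list' (stability reproduces A's first-strict-minimum tie-breaking) while the walk tracks the current node and accumulates the route cost incrementally, eliminating both A's sentinel min-scan per step and A's entire second pass that re-sums json_data[full_route[i]][full_route[i+1]].
import Mathlib
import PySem

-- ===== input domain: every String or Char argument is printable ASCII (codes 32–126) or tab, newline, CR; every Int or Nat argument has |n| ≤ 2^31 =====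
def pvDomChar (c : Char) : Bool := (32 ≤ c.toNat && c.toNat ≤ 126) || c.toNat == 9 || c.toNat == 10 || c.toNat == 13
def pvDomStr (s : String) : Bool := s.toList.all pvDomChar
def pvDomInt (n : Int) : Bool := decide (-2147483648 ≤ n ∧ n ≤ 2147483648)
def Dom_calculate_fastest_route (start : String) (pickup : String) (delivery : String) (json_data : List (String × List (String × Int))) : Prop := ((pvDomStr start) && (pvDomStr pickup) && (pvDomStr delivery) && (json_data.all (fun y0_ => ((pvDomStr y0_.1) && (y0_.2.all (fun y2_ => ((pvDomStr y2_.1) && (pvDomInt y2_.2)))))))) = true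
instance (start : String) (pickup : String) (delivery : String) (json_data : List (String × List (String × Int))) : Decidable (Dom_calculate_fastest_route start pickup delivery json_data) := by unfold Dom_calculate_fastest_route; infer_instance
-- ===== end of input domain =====

-- B pre-sorts each node's moves by time once (stable sort = A's first-strict-minimum tie-break),
-- walks taking the first unvisited entry while accumulating the cost; same return value everywhere.

-- shared input decoding: the Python receives json_data as a dict of dicts
def pvGraph (json_data : List (String × List (String × Int))) : PySem.Dict String (PySem.Dict String Int) :=
  PySem.Dict.ofList (json_data.map (fun p => (p.1, PySem.Dict.ofList p.2)))

-- fuel bound for the while-loops: each iteration either returns or appends a fresh node,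
-- and every appended node is an inner-dict key, so Σ inner sizes + 2 calls always suffice
def pvFuel (json_data : List (String × List (String × Int))) : Nat :=
  (json_data.map (fun p => p.2.length)).sum + 2

-- ===== PORT A =====
def find_next_move (current_pos : String) (visited : PySem.Set String) (graph : PySem.Dict String (PySem.Dict String Int)) : Option String :=
  let next_moves := graph.getD current_pos PySem.Dict.empty
  (next_moves.items.foldl
    (fun (acc : Option Int × Option String) pt =>
      if PySem.Set.contains visited pt.1 then acc
      else
        match acc.1 with  -- acc.1 = none models quickest_move = float('inf')
        | none => (some pt.2, some pt.1)
        | some q => if pt.2 < q then (some pt.2, some pt.1) else acc)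
    (none, none)).2

def calculate_subroute_loop (fuel : Nat) (route : List String) (visited : PySem.Set String) (end_ : String) (graph : PySem.Dict String (PySem.Dict String Int)) : Option (List String) :=
  match fuel with
  | 0 => none
  | Nat.succ fuel =>
    if PySem.List.pyGetD route (-1) "" = end_ then some route
    else
      match find_next_move (PySem.List.pyGetD route (-1) "") visited graph with
      | none => none
      | some p => calculate_subroute_loop fuel (route ++ [p]) (PySem.Set.add visited p) end_ graph

def calculate_subroute (start : String) (end_ : String) (graph : PySem.Dict String (PySem.Dict String Int)) (fuel : Nat) : Option (List String) :=
  calculate_subroute_loop fuel [start] (PySem.Set.ofList [start]) end_ graph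

-- the final sum's json_data[full_route[i]][full_route[i+1]] lookups always hit chosen edges
-- (proved below), so the getD defaults are never read and the port is exact
def calculate_fastest_route (start : String) (pickup : String) (delivery : String) (json_data : List (String × List (String × Int))) : Option (List String) × Int :=
  let graph := pvGraph json_data
  let fuel := pvFuel json_data
  match calculate_subroute start pickup graph fuel with
  | none => (none, 0)
  | some route_to_pickup =>
    match calculate_subroute pickup delivery graph fuel with
    | none => (none, 0)
    | some route_to_delivery =>
      let full_route := route_to_pickup ++ PySem.List.slice route_to_delivery (some 1) none
      (some full_route,
        ((PySem.List.pyRange 0 (PySem.List.len full_route - 1) 1).map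
          (fun i => (graph.getD (PySem.List.pyGetD full_route i "") PySem.Dict.empty).getD
                      (PySem.List.pyGetD full_route (i + 1) "") 0)).sum)

-- ===== PORT B =====
-- adj = {node: sorted(moves.items(), key=lambda kv: kv[1]) for node, moves in json_data.items()}
def pvAdj (json_data : List (String × List (String × Int))) : PySem.Dict String (List (String × Int)) :=
  PySem.Dict.ofList (json_data.map (fun p =>
    (p.1, PySem.List.sorted (PySem.Dict.ofList p.2).items (fun kv => kv.2) false)))

-- walk's while loop: first unvisited entry of the pre-sorted list, accumulating cost
def pv_walk_alt (fuel : Nat) (route : List String) (seen : PySem.Set String) (cost : Int) (cur : String) (dst : String) (adj : PySem.Dict String (List (String × Int))) : Option (List String × Int) :=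
  match fuel with
  | 0 => none
  | Nat.succ fuel =>
    if cur = dst then some (route, cost)
    else
      match (adj.getD cur []).find? (fun pt => !(PySem.Set.contains seen pt.1)) with
      | none => none
      | some pt => pv_walk_alt fuel (route ++ [pt.1]) (PySem.Set.add seen pt.1) (cost + pt.2) pt.1 dst adj

def calculate_fastest_route_alt (start : String) (pickup : String) (delivery : String) (json_data : List (String × List (String × Int))) : Option (List String) × Int :=
  let adj := pvAdj json_data
  let fuel := pvFuel json_data
  match pv_walk_alt fuel [start] (PySem.Set.ofList [start]) 0 start pickup adj with
  | none => (none, 0)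
  | some leg1 =>
    match pv_walk_alt fuel [pickup] (PySem.Set.ofList [pickup]) 0 pickup delivery adj with
    | none => (none, 0)
    | some leg2 => (some (leg1.1 ++ PySem.List.slice leg2.1 (some 1) none), leg1.2 + leg2.2)

-- ===== PRECONDITION & SPEC =====
def Spec_calculate_fastest_route (start : String) (pickup : String) (delivery : String) (json_data : List (String × List (String × Int))) (out : Option (List String) × Int) : Prop := out = calculate_fastest_route_alt start pickup delivery json_data
instance (start : String) (pickup : String) (delivery : String) (json_data : List (String × List (String × Int))) (out : Option (List String) × Int) : Decidable (Spec_calculate_fastest_route start pickup delivery json_data out) := by unfold Spec_calculate_fastest_route; infer_instance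

-- ===== CLAIM (what is proved, stated in full; the proofs are below) =====
def Claim_equal_calculate_fastest_route : Prop := ∀ (start : String) (pickup : String) (delivery : String) (json_data : List (String × List (String × Int))), Dom_calculate_fastest_route start pickup delivery json_data → Spec_calculate_fastest_route start pickup delivery json_data (calculate_fastest_route start pickup delivery json_data)

-- ===== LEMMAS AND PROOFS =====

-- edge weight and path cost (proof-side only)
def pvW (graph : PySem.Dict String (PySem.Dict String Int)) (x y : String) : Int :=
  (graph.getD x PySem.Dict.empty).getD y 0

def pvPathSum (graph : PySem.Dict String (PySem.Dict String Int)) : List String → Int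
  | [] => 0
  | [_] => 0
  | x :: y :: t => pvW graph x y + pvPathSum graph (y :: t)

-- A's sentinel fold over items equals min? over the unvisited-filtered items
theorem pv_findA_eq_min (visited : PySem.Set String) :
    ∀ (items : List (String × Int)) (m : Option (String × Int)),
      items.foldl
        (fun (acc : Option Int × Option String) pt =>
          if PySem.Set.contains visited pt.1 then acc
          else
            match acc.1 with
            | none => (some pt.2, some pt.1)
            | some q => if pt.2 < q then (some pt.2, some pt.1) else acc)
        (m.map (·.2), m.map (·.1))
      = (let r := PySem.List.min?
            (m.toList ++ items.filter (fun pt => !(PySem.Set.contains visited pt.1)))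
            (fun x => x.2)
         (r.map (·.2), r.map (·.1))) := by
  intro items
  induction items with
  | nil => intro m; cases m <;> simp [PySem.List.min?]
  | cons pt tl ih =>
    intro m
    cases hv : PySem.Set.contains visited pt.1 with
    | true =>
      simp only [List.foldl_cons, List.filter_cons, hv, Bool.not_true, Bool.false_eq_true,
        ite_false]
      exact ih m
    | false =>
      cases m with
      | none =>
        have h := ih (some pt)
        simp only [Option.map_some, Option.toList_some] at h
        simp only [List.foldl_cons, List.filter_cons, hv, Bool.not_false, Bool.false_eq_true,
          ite_true, Option.map_none, Option.toList_none,
          List.nil_append, List.singleton_append] at h ⊢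
        exact h
      | some mm =>
        by_cases hlt : pt.2 < mm.2
        · have h := ih (some pt)
          simp only [Option.map_some, Option.toList_some, List.singleton_append] at h
          have hhead : PySem.List.min? (mm :: pt :: List.filter (fun pt => !(PySem.Set.contains visited pt.1)) tl) (fun x => x.2)
              = PySem.List.min? (pt :: List.filter (fun pt => !(PySem.Set.contains visited pt.1)) tl) (fun x => x.2) := by
            simp [PySem.List.min?, hlt]
          simp only [List.foldl_cons, List.filter_cons, hv, Bool.not_false, Bool.false_eq_true,
            ite_true, Option.map_some, Option.toList_some,
            List.singleton_append, hlt, hhead]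
          exact h
        · have h := ih (some mm)
          simp only [Option.map_some, Option.toList_some, List.singleton_append] at h
          have hhead : PySem.List.min? (mm :: pt :: List.filter (fun pt => !(PySem.Set.contains visited pt.1)) tl) (fun x => x.2)
              = PySem.List.min? (mm :: List.filter (fun pt => !(PySem.Set.contains visited pt.1)) tl) (fun x => x.2) := by
            simp [PySem.List.min?, hlt]
          simp only [List.foldl_cons, List.filter_cons, hv, Bool.not_false, Bool.false_eq_true,
            ite_true, Option.map_some, Option.toList_some,
            List.singleton_append, hlt, hhead]
          exact h

theorem pv_find_next_move_eq (cur : String) (visited : PySem.Set String) (graph : PySem.Dict String (PySem.Dict String Int)) :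
    find_next_move cur visited graph
      = (PySem.List.min?
          (((graph.getD cur PySem.Dict.empty).items).filter (fun pt => !(PySem.Set.contains visited pt.1)))
          (fun x => x.2)).map (·.1) := by
  have h := pv_findA_eq_min visited ((graph.getD cur PySem.Dict.empty).items) none
  simp only [Option.map_none, Option.toList_none, List.nil_append] at h
  simp only [find_next_move]
  rw [h]

-- ===== B-side bridge: first unvisited entry of the stable-sorted list = first strict minimum =====

-- insertBy puts x in front when x goes before every element
theorem pv_insertBy_front {α : Type} (before : α → α → Bool) (x : α) (l : List α)
    (h : ∀ z ∈ l, before x z = true) : PySem.List.insertBy before x l = x :: l := by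
  cases l with
  | nil => rfl
  | cons z t => simp [PySem.List.insertBy, h z List.mem_cons_self]

-- insertBy with the sort order preserves sortedness
theorem pv_insertBy_pairwise {α : Type} (key : α → Int) (x : α) :
    ∀ (l : List α), l.Pairwise (fun a b => key a ≤ key b) →
      (PySem.List.insertBy (fun a b => decide (key a < key b)) x l).Pairwise (fun a b => key a ≤ key b) := by
  intro l
  induction l with
  | nil => intro _; simp [PySem.List.insertBy]
  | cons y ys ih =>
    intro hp
    rw [List.pairwise_cons] at hp
    by_cases hxy : key x < key y
    · simp only [PySem.List.insertBy, hxy, decide_true, if_true]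
      refine List.Pairwise.cons ?_ (List.Pairwise.cons hp.1 hp.2)
      intro z hz
      rcases List.mem_cons.mp hz with rfl | hz
      · exact le_of_lt hxy
      · exact le_trans (le_of_lt hxy) (hp.1 z hz)
    · simp only [PySem.List.insertBy, hxy, decide_false]
      refine List.Pairwise.cons ?_ (ih hp.2)
      intro z hz
      rcases (PySem.List.mem_insertBy _ _ _ _).mp hz with rfl | hz
      · exact le_of_not_gt hxy
      · exact hp.1 z hz

-- filter commutes with inserting into a sorted list
theorem pv_filter_insertBy {α : Type} (key : α → Int) (p : α → Bool) (x : α) :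
    ∀ (l : List α), l.Pairwise (fun a b => key a ≤ key b) →
      (PySem.List.insertBy (fun a b => decide (key a < key b)) x l).filter p
        = if p x then PySem.List.insertBy (fun a b => decide (key a < key b)) x (l.filter p)
          else l.filter p := by
  intro l
  induction l with
  | nil => intro _; simp [PySem.List.insertBy, List.filter_cons]
  | cons y ys ih =>
    intro hp
    rw [List.pairwise_cons] at hp
    by_cases hxy : key x < key y
    · have hins : PySem.List.insertBy (fun a b => decide (key a < key b)) x (y :: ys)
          = x :: y :: ys := by simp [PySem.List.insertBy, hxy]
      have hfront : PySem.List.insertBy (fun a b => decide (key a < key b)) x ((y :: ys).filter p)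
          = x :: (y :: ys).filter p := by
        apply pv_insertBy_front
        intro z hz
        have hz' : z ∈ y :: ys := List.mem_of_mem_filter hz
        rcases List.mem_cons.mp hz' with rfl | hz'
        · simpa using hxy
        · simpa using lt_of_lt_of_le hxy (hp.1 z hz')
      rw [hins, hfront, List.filter_cons]
    · have hins : PySem.List.insertBy (fun a b => decide (key a < key b)) x (y :: ys)
          = y :: PySem.List.insertBy (fun a b => decide (key a < key b)) x ys := by
        simp [PySem.List.insertBy, hxy]
      rw [hins, List.filter_cons, List.filter_cons, ih hp.2]
      by_cases hpy : p y
      · have hins2 : PySem.List.insertBy (fun a b => decide (key a < key b)) x (y :: ys.filter p)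
            = y :: PySem.List.insertBy (fun a b => decide (key a < key b)) x (ys.filter p) := by
          simp [PySem.List.insertBy, hxy]
        by_cases hpx : p x
        · simp only [hpy, hpx, if_true, hins2]
        · simp only [hpy, hpx, Bool.false_eq_true, if_false, if_true]
      · simp only [hpy, Bool.false_eq_true, if_false]

-- filter commutes with the whole insertion sort (stable sort of the filtered list)
theorem pv_filter_foldl_insertBy {α : Type} (key : α → Int) (p : α → Bool) :
    ∀ (items : List α) (acc : List α), acc.Pairwise (fun a b => key a ≤ key b) →
      (items.foldl (fun a x => PySem.List.insertBy (fun a b => decide (key a < key b)) x a) acc).filter p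
        = (items.filter p).foldl (fun a x => PySem.List.insertBy (fun a b => decide (key a < key b)) x a) (acc.filter p) := by
  intro items
  induction items with
  | nil => intro acc _; rfl
  | cons x tl ih =>
    intro acc hacc
    rw [List.foldl_cons, List.filter_cons,
      ih _ (pv_insertBy_pairwise key x acc hacc), pv_filter_insertBy key p x acc hacc]
    split_ifs <;> rfl

theorem pv_filter_sorted {α : Type} (key : α → Int) (p : α → Bool) (l : List α) :
    (PySem.List.sorted l key false).filter p = PySem.List.sorted (l.filter p) key false := by
  rw [PySem.List.sorted_eq_foldl_insertBy, PySem.List.sorted_eq_foldl_insertBy]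
  exact pv_filter_foldl_insertBy key p l [] (by simp)

-- the head of the stable sort is the first strict minimum (= Python's min / A's sentinel scan)
theorem pv_head_foldl_insertBy {α : Type} (key : α → Int) :
    ∀ (items : List α) (acc : List α),
      (items.foldl (fun a x => PySem.List.insertBy (fun a b => decide (key a < key b)) x a) acc).head?
        = items.foldl
            (fun (m : Option α) x =>
              match m with
              | none => some x
              | some m => if key x < key m then some x else some m)
            acc.head? := by
  intro items
  induction items with
  | nil => intro acc; rfl
  | cons x tl ih =>
    intro acc
    rw [List.foldl_cons, List.foldl_cons, ih]
    congr 1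
    cases acc with
    | nil => rfl
    | cons y ys =>
      by_cases hxy : key x < key y <;> simp [PySem.List.insertBy, hxy]

theorem pv_head_sorted_eq_min (l : List (String × Int)) :
    (PySem.List.sorted l (fun kv => kv.2) false).head? = PySem.List.min? l (fun kv => kv.2) := by
  rw [PySem.List.sorted_eq_foldl_insertBy]
  exact pv_head_foldl_insertBy (fun kv => kv.2) l []

-- pvAdj's entry for a node is the stable sort of pvGraph's entry
theorem pv_get?_ofList_map (H : PySem.Dict String Int → List (String × Int)) :
    ∀ (ps : List (String × List (String × Int)))
      (d1 : PySem.Dict String (List (String × Int))) (d2 : PySem.Dict String (PySem.Dict String Int)),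
      (∀ k, d1.get? k = (d2.get? k).map H) → ∀ k,
      (d1.update (ps.map (fun p => (p.1, H (PySem.Dict.ofList p.2))))).get? k
        = ((d2.update (ps.map (fun p => (p.1, PySem.Dict.ofList p.2)))).get? k).map H := by
  intro ps
  induction ps with
  | nil => intro d1 d2 h k; exact h k
  | cons p tl ih =>
    intro d1 d2 h k
    have h1 : d1.update ((p :: tl).map (fun p => (p.1, H (PySem.Dict.ofList p.2))))
        = (d1.insert p.1 (H (PySem.Dict.ofList p.2))).update (tl.map (fun p => (p.1, H (PySem.Dict.ofList p.2)))) := rfl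
    have h2 : d2.update ((p :: tl).map (fun p => (p.1, PySem.Dict.ofList p.2)))
        = (d2.insert p.1 (PySem.Dict.ofList p.2)).update (tl.map (fun p => (p.1, PySem.Dict.ofList p.2))) := rfl
    rw [h1, h2]
    apply ih
    intro k'
    rw [PySem.Dict.get?_insert, PySem.Dict.get?_insert]
    split_ifs with hk
    · rfl
    · exact h k'

theorem pv_adj_getD (json_data : List (String × List (String × Int))) (cur : String) :
    (pvAdj json_data).getD cur []
      = PySem.List.sorted ((pvGraph json_data).getD cur PySem.Dict.empty).items (fun kv => kv.2) false := by
  have h : (pvAdj json_data).get? cur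
      = ((pvGraph json_data).get? cur).map (fun d => PySem.List.sorted d.items (fun kv => kv.2) false) :=
    pv_get?_ofList_map (fun d => PySem.List.sorted d.items (fun kv => kv.2) false)
      json_data PySem.Dict.empty PySem.Dict.empty (by intro k; simp [PySem.Dict.get?_empty]) cur
  simp only [PySem.Dict.getD, h]
  cases (pvGraph json_data).get? cur with
  | none => rfl
  | some d => rfl

-- B's per-step choice (first unvisited entry of the sorted list) = A's first strict minimum
theorem pv_select_eq (json_data : List (String × List (String × Int))) (cur : String) (seen : PySem.Set String) :
    ((pvAdj json_data).getD cur []).find? (fun pt => !(PySem.Set.contains seen pt.1))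
      = PySem.List.min?
          ((((pvGraph json_data).getD cur PySem.Dict.empty).items).filter (fun pt => !(PySem.Set.contains seen pt.1)))
          (fun x => x.2) := by
  rw [pv_adj_getD, ← List.head?_filter, pv_filter_sorted, pv_head_sorted_eq_min]

-- every inner dict reachable through pvGraph has Nodup keys
theorem pv_getD_update_shape {ν : Type} (ps : List (String × ν)) :
    ∀ (d : PySem.Dict String ν) (k : String) (dflt : ν),
      (d.update ps).getD k dflt = d.getD k dflt ∨ ∃ p ∈ ps, (d.update ps).getD k dflt = p.2 := by
  induction ps with
  | nil => intro d k dflt; left; rfl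
  | cons p tl ih =>
    intro d k dflt
    have hupd : d.update (p :: tl) = (d.insert p.1 p.2).update tl := rfl
    rcases ih (d.insert p.1 p.2) k dflt with h | ⟨q, hq, hval⟩
    · rw [hupd, h, PySem.Dict.getD_insert]
      by_cases hk : k = p.1
      · right; exact ⟨p, List.mem_cons_self, by simp [hk]⟩
      · left; simp [hk]
    · right; exact ⟨q, List.mem_cons_of_mem _ hq, by rw [hupd, hval]⟩

theorem pv_nodup_inner (json_data : List (String × List (String × Int))) (k : String) :
    ((pvGraph json_data).getD k PySem.Dict.empty).keys.Nodup := by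
  have h := pv_getD_update_shape (json_data.map (fun p => (p.1, PySem.Dict.ofList p.2)))
      PySem.Dict.empty k PySem.Dict.empty
  have hg : pvGraph json_data
      = PySem.Dict.empty.update (json_data.map (fun p => (p.1, PySem.Dict.ofList p.2))) := rfl
  rw [hg]
  rcases h with h | ⟨p, hp, hval⟩
  · rw [h, PySem.Dict.getD_empty]
    exact PySem.Dict.nodup_keys_empty
  · rcases List.mem_map.mp hp with ⟨q, _, rfl⟩
    rw [hval]
    exact PySem.Dict.nodup_keys_ofList q.2

-- the weight of the chosen edge is what the dict lookup returns
theorem pv_chosen_weight (json_data : List (String × List (String × Int))) (cur : String)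
    (seen : PySem.Set String) (pt : String × Int)
    (h : PySem.List.min?
          ((((pvGraph json_data).getD cur PySem.Dict.empty).items).filter (fun pt => !(PySem.Set.contains seen pt.1)))
          (fun x => x.2) = some pt) :
    pvW (pvGraph json_data) cur pt.1 = pt.2 := by
  have hmem : pt ∈ (((pvGraph json_data).getD cur PySem.Dict.empty).items).filter
      (fun pt => !(PySem.Set.contains seen pt.1)) := PySem.List.min?_mem h
  have hmem' : (pt.1, pt.2) ∈ ((pvGraph json_data).getD cur PySem.Dict.empty).items := by
    simpa using List.mem_of_mem_filter hmem
  exact PySem.Dict.getD_of_mem_items _ hmem' (pv_nodup_inner json_data cur) 0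

theorem pv_pathSum_append_singleton (graph : PySem.Dict String (PySem.Dict String Int)) :
    ∀ (route : List String) (p : String) (h : route ≠ []),
      pvPathSum graph (route ++ [p]) = pvPathSum graph route + pvW graph (route.getLast h) p := by
  intro route
  induction route with
  | nil => intro p h; exact absurd rfl h
  | cons x tl ih =>
    intro p h
    cases tl with
    | nil => simp [pvPathSum]
    | cons y t =>
      have := ih p (by simp)
      simp only [List.cons_append, pvPathSum] at *
      rw [this]
      simp [List.getLast_cons]
      ring

-- B's sorted-adjacency accumulating walk returns A's route together with its path cost
theorem pv_loop_rel (b : String) (json_data : List (String × List (String × Int))) :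
    ∀ (fuel : Nat) (route : List String) (visited : PySem.Set String) (cost : Int) (cur : String),
      route ≠ [] → cur = PySem.List.pyGetD route (-1) "" →
      pv_walk_alt fuel route visited cost cur b (pvAdj json_data)
        = (calculate_subroute_loop fuel route visited b (pvGraph json_data)).map
            (fun r => (r, cost - pvPathSum (pvGraph json_data) route + pvPathSum (pvGraph json_data) r)) := by
  intro fuel
  induction fuel with
  | zero => intro route visited cost cur hr hcur; rfl
  | succ fuel ih =>
    intro route visited cost cur hr hcur
    subst hcur
    by_cases hend : PySem.List.pyGetD route (-1) "" = b
    · simp only [pv_walk_alt, calculate_subroute_loop, hend, if_true, Option.map_some]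
      simp
    · simp only [pv_walk_alt, calculate_subroute_loop, hend, if_false,
        pv_find_next_move_eq, pv_select_eq]
      cases hmin : PySem.List.min?
          ((((pvGraph json_data).getD (PySem.List.pyGetD route (-1) "") PySem.Dict.empty).items).filter
            (fun pt => !(PySem.Set.contains visited pt.1))) (fun x => x.2) with
      | none => simp
      | some pt =>
        simp only [Option.map_some]
        have hlastnew : pt.1 = PySem.List.pyGetD (route ++ [pt.1]) (-1) "" := by
          rw [PySem.List.pyGetD_neg_one (route ++ [pt.1]) "" (by simp)]
          simp
        rw [ih (route ++ [pt.1]) (PySem.Set.add visited pt.1) (cost + pt.2) pt.1 (by simp) hlastnew]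
        have hlast : PySem.List.pyGetD route (-1) "" = route.getLast hr :=
          PySem.List.pyGetD_neg_one route "" hr
        have hw : pvW (pvGraph json_data) (route.getLast hr) pt.1 = pt.2 := by
          rw [← hlast]; exact pv_chosen_weight _ _ _ _ (by rw [hlast] at hmin ⊢; exact hmin)
        have hps := pv_pathSum_append_singleton (pvGraph json_data) route pt.1 hr
        congr 1
        funext r
        rw [hps, hw]
        ring_nf

-- A's loop returns an extension of its route ending at the target
theorem pv_loopA_shape (graph : PySem.Dict String (PySem.Dict String Int)) (b : String) :
    ∀ (fuel : Nat) (route : List String) (visited : PySem.Set String) (r : List String),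
      calculate_subroute_loop fuel route visited b graph = some r →
      (∃ ext, r = route ++ ext) ∧ (route ≠ [] → PySem.List.pyGetD r (-1) "" = b) := by
  intro fuel
  induction fuel with
  | zero => intro route visited r h; exact absurd h (by simp [calculate_subroute_loop])
  | succ fuel ih =>
    intro route visited r h
    by_cases hend : PySem.List.pyGetD route (-1) "" = b
    · simp only [calculate_subroute_loop, hend, if_true] at h
      obtain rfl : route = r := by simpa using h
      exact ⟨⟨[], by simp⟩, fun _ => hend⟩
    · simp only [calculate_subroute_loop, hend, if_false] at h
      cases hfind : find_next_move (PySem.List.pyGetD route (-1) "") visited graph with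
      | none => rw [hfind] at h; exact absurd h (by simp)
      | some p =>
        rw [hfind] at h
        obtain ⟨⟨ext, hext⟩, hlast⟩ := ih (route ++ [p]) (PySem.Set.add visited p) r h
        exact ⟨⟨p :: ext, by simpa using hext⟩, fun _ => hlast (by simp)⟩

theorem pv_pathSum_append (graph : PySem.Dict String (PySem.Dict String Int)) :
    ∀ (xs : List String) (ys : List String) (h : xs ≠ []),
      pvPathSum graph (xs ++ ys) = pvPathSum graph xs + pvPathSum graph (xs.getLast h :: ys) := by
  intro xs
  induction xs with
  | nil => intro ys h; exact absurd rfl h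
  | cons x tl ih =>
    intro ys h
    cases tl with
    | nil => cases ys <;> simp [pvPathSum]
    | cons y t =>
      have := ih ys (by simp)
      simp only [List.cons_append, pvPathSum] at *
      rw [this]
      simp [List.getLast_cons]
      ring

-- the index-sum over consecutive pairs is the structural path cost (pure list version)
theorem pv_sumIdx (f : String → String → Int) :
    ∀ (l : List String) (graph : PySem.Dict String (PySem.Dict String Int)),
      (∀ x y, f x y = pvW graph x y) →
      ((List.range (l.length - 1)).map (fun k => f (l.getD k "") (l.getD (k + 1) ""))).sum
        = pvPathSum graph l := by
  intro l
  induction l with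
  | nil => intro graph hf; rfl
  | cons x tl ih =>
    intro graph hf
    cases tl with
    | nil => rfl
    | cons y t =>
      have hlen : (x :: y :: t).length - 1 = ((y :: t).length - 1) + 1 := by
        simp
      rw [hlen, List.range_succ_eq_map, List.map_cons, List.map_map, List.sum_cons]
      have htail : ((List.range ((y :: t).length - 1)).map
          ((fun k => f ((x :: y :: t).getD k "") ((x :: y :: t).getD (k + 1) "")) ∘ Nat.succ)).sum
          = pvPathSum graph (y :: t) := by
        rw [← ih graph hf]
        apply congrArg List.sum
        apply List.map_congr_left
        intro k _
        simp [Function.comp, List.getD]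
      rw [htail]
      have h0 : (x :: y :: t).getD 0 "" = x := rfl
      have h1 : (x :: y :: t).getD (0 + 1) "" = y := rfl
      simp only [pvPathSum, h0, h1, hf]

-- bridge from A's pyRange/pyGetD sum to the pure list version
theorem pv_rangeSum_eq_pathSum (graph : PySem.Dict String (PySem.Dict String Int)) (l : List String) :
    ((PySem.List.pyRange 0 (PySem.List.len l - 1) 1).map
      (fun i => (graph.getD (PySem.List.pyGetD l i "") PySem.Dict.empty).getD
                  (PySem.List.pyGetD l (i + 1) "") 0)).sum
      = pvPathSum graph l := by
  cases l with
  | nil => simp [PySem.List.len, PySem.List.pyRange_one_eq_nil, pvPathSum]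
  | cons x tl =>
    have hcast : PySem.List.len (x :: tl) - 1 = (((x :: tl).length - 1 : Nat) : Int) := by
      simp [PySem.List.len_eq]
    rw [hcast, PySem.List.pyRange_one]
    have : ((((x :: tl).length - 1 : Nat) : Int) - 0).toNat = (x :: tl).length - 1 := by omega
    rw [this, List.map_map]
    rw [← pv_sumIdx (fun a b => pvW graph a b) (x :: tl) graph (fun _ _ => rfl)]
    congr 1
    apply List.map_congr_left
    intro k _
    have h1 : (0 : Int) + (k : Int) = ((k : Nat) : Int) := by omega
    have h2 : (0 : Int) + (k : Int) + 1 = (((k + 1 : Nat)) : Int) := by push_cast; omega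
    simp only [Function.comp]
    rw [h2, h1]
    simp only [PySem.List.pyGetD_natCast]
    rfl

-- ===== VERDICT (by name: the statement is the Claim_ definition above) =====
theorem calculate_fastest_route_spec : Claim_equal_calculate_fastest_route := by
  intro start pickup delivery json_data _
  unfold Spec_calculate_fastest_route calculate_fastest_route calculate_fastest_route_alt
    calculate_subroute
  simp only []
  rw [pv_loop_rel pickup json_data (pvFuel json_data) [start]
      (PySem.Set.ofList [start]) 0 start (by simp) (by rw [PySem.List.pyGetD_neg_one [start] "" (by simp)]; simp)]
  cases h1 : calculate_subroute_loop (pvFuel json_data) [start] (PySem.Set.ofList [start]) pickup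
      (pvGraph json_data) with
  | none => rfl
  | some r1 =>
    simp only [Option.map_some]
    rw [pv_loop_rel delivery json_data (pvFuel json_data) [pickup]
        (PySem.Set.ofList [pickup]) 0 pickup (by simp) (by rw [PySem.List.pyGetD_neg_one [pickup] "" (by simp)]; simp)]
    cases h2 : calculate_subroute_loop (pvFuel json_data) [pickup] (PySem.Set.ofList [pickup])
        delivery (pvGraph json_data) with
    | none => rfl
    | some r2 =>
      simp only [Option.map_some]
      obtain ⟨⟨ext1, hext1⟩, hlast1⟩ := pv_loopA_shape (pvGraph json_data) pickup _ _ _ _ h1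
      obtain ⟨⟨ext2, hext2⟩, _⟩ := pv_loopA_shape (pvGraph json_data) delivery _ _ _ _ h2
      have hlast1' : PySem.List.pyGetD r1 (-1) "" = pickup := hlast1 (by simp)
      have hr1ne : r1 ≠ [] := by rw [hext1]; simp
      have hslice : PySem.List.slice r2 (some 1) none = ext2 := by
        rw [hext2]; simp [PySem.List.slice_from_one]
      have hgetLast : r1.getLast hr1ne = pickup := by
        rw [← hlast1', PySem.List.pyGetD_neg_one r1 "" hr1ne]
      have hsum : pvPathSum (pvGraph json_data) (r1 ++ ext2)
          = pvPathSum (pvGraph json_data) r1 + pvPathSum (pvGraph json_data) r2 := by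
        rw [pv_pathSum_append (pvGraph json_data) r1 ext2 hr1ne, hgetLast, hext2]
        simp
      rw [pv_rangeSum_eq_pathSum]
      simp only [hslice, hsum]
      have hz1 : pvPathSum (pvGraph json_data) [start] = (0 : Int) := rfl
      have hz2 : pvPathSum (pvGraph json_data) [pickup] = (0 : Int) := rfl
      congr 1
      rw [hz1, hz2]
      ring
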